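-- pv_equiv track=rewrite | github.com/Luwei-Lin/LeetCode | LC0838.py | pushDominoes2
-- ===== SOURCE A (Python) =====
-- def pushDominoes2(d):
--     d = 'L' + d + 'R'
--     res = ""
--     i = 0
--     for j in range(1, len(d)):
--         if d[j] == '.':
--             continue
--         middle = j - i - 1
--         if i:#i != 0
--             res += d[i]
--         if d[i] == d[j]:# two characters are the same
--             res += d[i] * middle
--         elif d[i] == 'L' and d[j] == 'R':#
--             res += '.' * middle
--         else:
--             res += 'R' * int(middle / 2) + '.' * int(middle % 2) + 'L' * int(middle / 2)
--         i = j
--     return res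
-- ===== SOURCE B (Python) =====
-- def pushDominoes2(d):
--     left = []
--     ch, dist = 'L', 0
--     for c in d:
--         if c == '.':
--             dist += 1
--         else:
--             ch, dist = c, 0
--         left.append((ch, dist))
--     out = []
--     ch, dist = 'R', 0
--     for c, (u, ld) in zip(reversed(d), reversed(left)):
--         if c == '.':
--             dist += 1
--         else:
--             ch, dist = c, 0
--         if ld == 0:
--             out.append(c)
--         elif u == ch:
--             out.append(u)
--         elif u == 'L' and ch == 'R':
--             out.append('.')
--         else:
--             m = ld + dist - 1
--             h = m // 2
--             k = ld - 1
--             out.append('R' if k < h else ('L' if k >= m - h else '.'))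
--     out.reverse()
--     return ''.join(out)
-- ===== Notes on version B (the rewrite author's own statement) =====
-- stated objective: alternative
-- what changed: Replaces A's single pass over the sentinel-extended string, which fills whole intervals between consecutive anchor pairs, with two directional sweeps recording each cell's nearest anchor and distance on either side followed by a per-cell decision; equal to A on every string.
import Mathlib
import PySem

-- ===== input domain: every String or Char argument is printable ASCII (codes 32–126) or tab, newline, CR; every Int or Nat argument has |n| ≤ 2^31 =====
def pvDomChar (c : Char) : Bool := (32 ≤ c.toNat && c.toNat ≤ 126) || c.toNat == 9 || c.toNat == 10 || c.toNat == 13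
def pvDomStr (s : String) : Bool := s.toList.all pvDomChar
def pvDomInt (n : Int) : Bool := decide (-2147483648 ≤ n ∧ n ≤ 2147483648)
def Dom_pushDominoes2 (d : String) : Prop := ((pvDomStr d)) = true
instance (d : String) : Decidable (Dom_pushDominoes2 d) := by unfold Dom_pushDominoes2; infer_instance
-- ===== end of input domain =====

-- B replaces A's anchor-interval filling with two nearest-anchor/distance sweeps and a per-cell
-- decision; alternative algorithm of the same asymptotic cost, equal to A on every input string.

-- ===== PORT A =====
-- Literal port of A: s = 'L'+d+'R'; one pass j = 1..len(s)-1 keeping the last anchor index i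
-- and the accumulated result (res as a List Char, returned via String.ofList).
-- Python's int(middle/2) and int(middle % 2) equal middle.toNat/2 and middle.toNat%2 since middle = j-i-1 ≥ 0 here.
def pushDominoes2 (d : String) : String :=
  let s : List Char := 'L' :: (d.toList ++ ['R'])
  let r := (PySem.List.pyRange 1 (PySem.List.len s) 1).foldl (fun (st : List Char × Int) j =>
    let res := st.1
    let i := st.2
    let cj := PySem.List.pyGetD s j ' '
    if cj = '.' then st
    else
      let middle := j - i - 1
      let ci := PySem.List.pyGetD s i ' '
      let res := if i ≠ 0 then res ++ [ci] else res
      let res :=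
        if ci = cj then res ++ List.replicate middle.toNat ci
        else if ci = 'L' ∧ cj = 'R' then res ++ List.replicate middle.toNat '.'
        else res ++ (List.replicate (middle.toNat / 2) 'R' ++ List.replicate (middle.toNat % 2) '.' ++
                     List.replicate (middle.toNat / 2) 'L')
      (res, j)) ([], 0)
  String.ofList r.1

-- ===== PORT B =====
-- Literal port of B (Source B): a left-to-right sweep recording (nearest non-dot to the left, distance)
-- per cell, then a right-to-left pass (a fold over the reversed zip, as in Source B) carrying the same
-- data from the right and deciding each cell locally; the collected output is reversed at the end.
def pushDominoes2_alt (d : String) : String :=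
  let l := d.toList
  let left := (l.foldl (fun (st : List (Char × Int) × Char × Int) c =>
      let ch := if c = '.' then st.2.1 else c
      let dist := if c = '.' then st.2.2 + 1 else 0
      (st.1 ++ [(ch, dist)], ch, dist)) ([], 'L', 0)).1
  let out := ((l.reverse.zip left.reverse).foldl (fun (st : List Char × Char × Int) p =>
      let c := p.1
      let u := p.2.1
      let ld := p.2.2
      let ch := if c = '.' then st.2.1 else c
      let dist := if c = '.' then st.2.2 + 1 else 0
      let o :=
        if ld = 0 then c
        else if u = ch then u
        else if u = 'L' ∧ ch = 'R' then '.'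
        else
          let m := ld + dist - 1
          let h := PySem.Int.floordiv m 2
          if ld - 1 < h then 'R' else if ld - 1 ≥ m - h then 'L' else '.'
      (st.1 ++ [o], ch, dist)) ([], 'R', 0)).1
  String.ofList out.reverse

-- ===== PRECONDITION & SPEC =====
def Spec_pushDominoes2 (d : String) (out : String) : Prop := out = pushDominoes2_alt d
instance (d : String) (out : String) : Decidable (Spec_pushDominoes2 d out) := by unfold Spec_pushDominoes2; infer_instance

-- ===== CLAIM (what is proved, stated in full; the proofs are below) =====
def Claim_equal_pushDominoes2 : Prop := ∀ (d : String), Dom_pushDominoes2 d → Spec_pushDominoes2 d (pushDominoes2 d)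

-- ===== LEMMAS AND PROOFS =====

-- Common segment-wise description of both results: the m cells between the previous anchor a and
-- the next anchor b are rendered by fillGap; goSpec walks the rest of the string carrying the
-- previous anchor a (initially the virtual left wall 'L') and the pending-dot count m.
def fillGap (a b : Char) (m : Nat) : List Char :=
  if a = b then List.replicate m a
  else if a = 'L' ∧ b = 'R' then List.replicate m '.'
  else List.replicate (m / 2) 'R' ++ List.replicate (m % 2) '.' ++ List.replicate (m / 2) 'L'

def goSpec (a : Char) (m : Nat) : List Char → List Char
  | [] => fillGap a 'R' m
  | c :: t => if c = '.' then goSpec a (m + 1) t else fillGap a c m ++ c :: goSpec c 0 t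

-- ---------- A side ----------

-- the loop body of port A, abstracted over the current index j and character cj = s[j]
def bodyA (s : List Char) (st : List Char × Int) (j : Int) (cj : Char) : List Char × Int :=
  let res := st.1
  let i := st.2
  if cj = '.' then st
  else
    let middle := j - i - 1
    let ci := PySem.List.pyGetD s i ' '
    let res := if i ≠ 0 then res ++ [ci] else res
    let res :=
      if ci = cj then res ++ List.replicate middle.toNat ci
      else if ci = 'L' ∧ cj = 'R' then res ++ List.replicate middle.toNat '.'
      else res ++ (List.replicate (middle.toNat / 2) 'R' ++ List.replicate (middle.toNat % 2) '.' ++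
                   List.replicate (middle.toNat / 2) 'L')
    (res, j)

-- a fold over range(a, len(s)) reading s[j] is a fold over the enumerated suffix
lemma foldIdx_eq_foldEnum {σ : Type} (s : List Char) (f : σ → Int → Char → σ) :
    ∀ (k : Nat) (a : Nat) (init : σ), s.length - a ≤ k →
    (PySem.List.pyRange (a : Int) (s.length : Int) 1).foldl
        (fun st j => f st j (PySem.List.pyGetD s j ' ')) init
      = (PySem.List.enumerate (s.drop a) (a : Int)).foldl (fun st p => f st p.1 p.2) init := by
  intro k
  induction k with
  | zero =>
    intro a init h
    have ha : s.length ≤ a := by omega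
    rw [PySem.List.pyRange_one_eq_nil (by exact_mod_cast ha), List.drop_eq_nil_of_le ha]
    simp [PySem.List.enumerate]
  | succ k ih =>
    intro a init h
    by_cases ha : s.length ≤ a
    · rw [PySem.List.pyRange_one_eq_nil (by exact_mod_cast ha), List.drop_eq_nil_of_le ha]
      simp [PySem.List.enumerate]
    · have ha' : a < s.length := by omega
      rw [PySem.List.pyRange_one_cons (by exact_mod_cast ha'),
          List.drop_eq_getElem_cons ha', PySem.List.enumerate_cons]
      simp only [List.foldl_cons]
      have h1 : PySem.List.pyGetD s (a : Int) ' ' = s[a] := by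
        simp [PySem.List.pyGetD_natCast, List.getD_eq_getElem?_getD, ha']
      rw [h1]
      have : ((a : Int) + 1) = ((a + 1 : Nat) : Int) := by push_cast; ring
      rw [this, ih (a + 1) _ (by omega)]

-- skipping the pending dots leaves the state unchanged
lemma foldEnum_dots (s : List Char) :
    ∀ (m : Nat) (j₀ : Int) (st : List Char × Int),
    (PySem.List.enumerate (List.replicate m '.') j₀).foldl (fun st p => bodyA s st p.1 p.2) st = st := by
  intro m
  induction m with
  | zero => intro j₀ st; simp [PySem.List.enumerate]
  | succ m ih =>
    intro j₀ st
    rw [List.replicate_succ, PySem.List.enumerate_cons]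
    simp only [List.foldl_cons]
    rw [show bodyA s st j₀ '.' = st from rfl]
    exact ih _ _

-- s[i] at the anchor position
lemma pyGetD_anchor (pre₀ : List Char) (a : Char) (rest : List Char) :
    PySem.List.pyGetD (pre₀ ++ a :: rest) ((pre₀.length : Nat) : Int) ' ' = a := by
  simp [PySem.List.pyGetD_natCast, List.getD_eq_getElem?_getD]

-- A's three fill branches are exactly fillGap
lemma branch_eq (a c : Char) (m : Nat) (r : List Char) :
    (if a = c then r ++ List.replicate m a
     else if a = 'L' ∧ c = 'R' then r ++ List.replicate m '.'
     else r ++ (List.replicate (m / 2) 'R' ++ List.replicate (m % 2) '.' ++ List.replicate (m / 2) 'L'))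
    = r ++ fillGap a c m := by
  unfold fillGap
  split_ifs <;> rfl

-- one anchor step of A's loop body
lemma bodyA_anchor (s pre₀ rest : List Char) (a c : Char) (hs : s = pre₀ ++ a :: rest)
    (hc : ¬ c = '.') (m : Nat) (res : List Char) :
    bodyA s (res, (pre₀.length : Int)) ((pre₀.length : Int) + 1 + m) c
      = ((if pre₀.length = 0 then res else res ++ [a]) ++ fillGap a c m,
         (pre₀.length : Int) + 1 + m) := by
  subst hs
  have hm : (((pre₀.length : Int) + 1 + m) - pre₀.length - 1).toNat = m := by omega
  simp only [bodyA, if_neg hc, pyGetD_anchor, hm]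
  rw [branch_eq a c]
  by_cases h0 : pre₀.length = 0 <;> simp [h0]

-- the loop of A, started just after anchor a with m pending dots, produces goSpec
lemma mainA : ∀ (t pre₀ : List Char) (a : Char) (m : Nat) (res : List Char) (s : List Char),
    s = pre₀ ++ a :: (List.replicate m '.' ++ t ++ ['R']) →
    (PySem.List.enumerate (List.replicate m '.' ++ t ++ ['R']) ((pre₀.length : Int) + 1)).foldl
        (fun st p => bodyA s st p.1 p.2) (res, (pre₀.length : Int))
      = (res ++ (if pre₀.length = 0 then [] else [a]) ++ goSpec a m t,
         (pre₀.length : Int) + 1 + m + t.length) := by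
  intro t
  induction t with
  | nil =>
    intro pre₀ a m res s hs
    simp only [List.append_nil]
    rw [PySem.List.enumerate_append, List.foldl_append, foldEnum_dots, PySem.List.enumerate_cons]
    simp only [PySem.List.enumerate_nil, List.foldl_cons, List.foldl_nil, List.length_replicate]
    rw [bodyA_anchor s pre₀ _ a 'R' (by rw [hs]) (by decide) m res]
    simp only [goSpec, List.length_nil, Nat.cast_zero, add_zero]
    by_cases h0 : pre₀.length = 0 <;> simp [h0]
  | cons c t' ih =>
    intro pre₀ a m res s hs
    by_cases hc : c = '.'
    · subst hc
      have hrw : List.replicate m '.' ++ '.' :: t' ++ ['R']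
          = List.replicate (m + 1) '.' ++ t' ++ ['R'] := by
        rw [List.replicate_succ']; simp
      rw [hrw] at hs ⊢
      rw [ih pre₀ a (m + 1) res s hs]
      have : goSpec a m ('.' :: t') = goSpec a (m + 1) t' := by simp [goSpec]
      rw [this]
      congr 1
      push_cast [List.length_cons]
      ring
    · have e1 : List.replicate m '.' ++ (c :: t') ++ ['R'] = List.replicate m '.' ++ (c :: (t' ++ ['R'])) := by
        simp
      rw [e1, PySem.List.enumerate_append, List.foldl_append, foldEnum_dots, PySem.List.enumerate_cons]
      simp only [List.foldl_cons, List.length_replicate]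
      rw [bodyA_anchor s pre₀ _ a c (by rw [hs]) hc m res]
      have hs' : s = (pre₀ ++ a :: List.replicate m '.') ++ c :: (List.replicate 0 '.' ++ t' ++ ['R']) := by
        rw [hs]; simp
      have IH := ih (pre₀ ++ a :: List.replicate m '.') c 0
          ((if pre₀.length = 0 then res else res ++ [a]) ++ fillGap a c m) s hs'
      have hlen : (((pre₀ ++ a :: List.replicate m '.').length : Nat) : Int)
          = (pre₀.length : Int) + 1 + m := by
        push_cast [List.length_append, List.length_cons, List.length_replicate]; ring
      have hne : ¬ ((pre₀ ++ a :: List.replicate m '.').length = 0) := by simp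
      simp only [List.replicate_zero, List.nil_append, Nat.cast_zero, add_zero, hlen,
        if_neg hne] at IH
      rw [IH]
      simp only [goSpec, if_neg hc]
      congr 1
      · by_cases h0 : pre₀.length = 0 <;> simp [h0]
      · push_cast [List.length_cons]; ring

-- characterization of port A: its loop is the bodyA fold over the enumerated suffix
lemma portA_eq (d : String) :
    pushDominoes2 d = String.ofList
      (((PySem.List.enumerate (d.toList ++ ['R']) 1).foldl
        (fun st p => bodyA ('L' :: (d.toList ++ ['R'])) st p.1 p.2) ([], 0)).1) := by
  unfold pushDominoes2
  show String.ofList (((PySem.List.pyRange 1 (PySem.List.len ('L' :: (d.toList ++ ['R']))) 1).foldl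
      (fun st j => bodyA ('L' :: (d.toList ++ ['R'])) st j
        (PySem.List.pyGetD ('L' :: (d.toList ++ ['R'])) j ' ')) ([], 0)).1) = _
  have h := foldIdx_eq_foldEnum ('L' :: (d.toList ++ ['R']))
      (bodyA ('L' :: (d.toList ++ ['R']))) ('L' :: (d.toList ++ ['R'])).length 1
      ([], (0 : Int)) (by omega)
  simp only [Nat.cast_one, List.drop_succ_cons, List.drop_zero] at h
  rw [PySem.List.len_eq, h]

-- A's result is goSpec
lemma A_eq_goSpec (d : String) :
    pushDominoes2 d = String.ofList (goSpec 'L' 0 d.toList) := by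
  rw [portA_eq]
  have hm := mainA d.toList [] 'L' 0 [] ('L' :: (d.toList ++ ['R'])) (by simp)
  simp only [List.length_nil, Nat.cast_zero, zero_add, List.replicate_zero, List.nil_append] at hm
  rw [hm]
  simp

-- ---------- B side ----------

-- per-cell data of the left sweep: (nearest non-dot char to the left, distance to it)
def lsAux (a : Char) (j : Int) : List Char → List (Char × Int)
  | [] => []
  | c :: t => if c = '.' then (a, j + 1) :: lsAux a (j + 1) t else (c, 0) :: lsAux c 0 t

-- the per-cell decision of Source B's second loop (after the right context (v, rd) is updated)
def cellOut (u v : Char) (ld rd : Int) (c : Char) : Char :=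
  if ld = 0 then c
  else if u = v then u
  else if u = 'L' ∧ v = 'R' then '.'
  else
    let m := ld + rd - 1
    let h := PySem.Int.floordiv m 2
    if ld - 1 < h then 'R' else if ld - 1 ≥ m - h then 'L' else '.'

-- the right-to-left pass, written structurally on the in-order zip list:
-- returns (output cells in order, right context at the left boundary)
def rsAux : List (Char × (Char × Int)) → Char → Int → List Char × Char × Int
  | [], v, rd => ([], v, rd)
  | p :: t, v, rd =>
    let r := rsAux t v rd
    let ch := if p.1 = '.' then r.2.1 else p.1
    let dist := if p.1 = '.' then r.2.2 + 1 else 0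
    (cellOut p.2.1 ch p.2.2 dist p.1 :: r.1, ch, dist)

lemma lsAux_length (l : List Char) : ∀ (a : Char) (j : Int), (lsAux a j l).length = l.length := by
  induction l with
  | nil => intro a j; rfl
  | cons c t ih =>
    intro a j
    by_cases hc : c = '.' <;> simp [lsAux, hc, ih]

lemma foldLS_fst : ∀ (l : List Char) (acc : List (Char × Int)) (a : Char) (j : Int),
    (l.foldl (fun (st : List (Char × Int) × Char × Int) c =>
        let ch := if c = '.' then st.2.1 else c
        let dist := if c = '.' then st.2.2 + 1 else 0
        (st.1 ++ [(ch, dist)], ch, dist)) (acc, a, j)).1 = acc ++ lsAux a j l := by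
  intro l
  induction l with
  | nil => intro acc a j; simp [lsAux]
  | cons c t ih =>
    intro acc a j
    simp only [List.foldl_cons]
    by_cases hc : c = '.'
    · subst hc
      simp only [lsAux]
      rw [ih]
      simp
    · simp only [if_neg hc, lsAux]
      rw [ih]
      simp

-- the reversed-zip foldl of Source B is rsAux (output reversed)
lemma foldRS_rev : ∀ (z : List (Char × (Char × Int))),
    z.foldr (fun p (st : List Char × Char × Int) =>
        let c := p.1
        let u := p.2.1
        let ld := p.2.2
        let ch := if c = '.' then st.2.1 else c
        let dist := if c = '.' then st.2.2 + 1 else 0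
        let o :=
          if ld = 0 then c
          else if u = ch then u
          else if u = 'L' ∧ ch = 'R' then '.'
          else
            let m := ld + dist - 1
            let h := PySem.Int.floordiv m 2
            if ld - 1 < h then 'R' else if ld - 1 ≥ m - h then 'L' else '.'
        (st.1 ++ [o], ch, dist)) ([], 'R', 0)
      = (((rsAux z 'R' 0).1).reverse, (rsAux z 'R' 0).2) := by
  intro z
  induction z with
  | nil => rfl
  | cons p t ih =>
    simp only [List.foldr_cons, rsAux, ih]
    simp [cellOut]

-- reversing both lists before zipping reverses the zip (equal lengths)
lemma zip_reverse_eq {α β : Type} : ∀ (l₁ : List α) (l₂ : List β), l₁.length = l₂.length →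
    l₁.reverse.zip l₂.reverse = (l₁.zip l₂).reverse := by
  intro l₁
  induction l₁ with
  | nil => intro l₂ h; simp
  | cons x t ih =>
    intro l₂ h
    cases l₂ with
    | nil => simp at h
    | cons y t₂ =>
      have h' : t.length = t₂.length := by simpa using h
      simp only [List.reverse_cons, List.zip_cons_cons]
      rw [List.zip_append (by simp [h']), ih t₂ h']
      simp

-- characterization of port B
lemma portB_eq (d : String) :
    pushDominoes2_alt d
      = String.ofList ((rsAux (d.toList.zip (lsAux 'L' 0 d.toList)) 'R' 0).1) := by
  unfold pushDominoes2_alt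
  show String.ofList ((((d.toList.reverse.zip
      (((d.toList.foldl (fun (st : List (Char × Int) × Char × Int) c =>
        let ch := if c = '.' then st.2.1 else c
        let dist := if c = '.' then st.2.2 + 1 else 0
        (st.1 ++ [(ch, dist)], ch, dist)) ([], 'L', 0)).1).reverse)).foldl
      (fun (st : List Char × Char × Int) p =>
        let c := p.1
        let u := p.2.1
        let ld := p.2.2
        let ch := if c = '.' then st.2.1 else c
        let dist := if c = '.' then st.2.2 + 1 else 0
        let o :=
          if ld = 0 then c
          else if u = ch then u
          else if u = 'L' ∧ ch = 'R' then '.'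
          else
            let m := ld + dist - 1
            let h := PySem.Int.floordiv m 2
            if ld - 1 < h then 'R' else if ld - 1 ≥ m - h then 'L' else '.'
        (st.1 ++ [o], ch, dist)) ([], 'R', 0)).1).reverse) = _
  rw [foldLS_fst]
  simp only [List.nil_append]
  rw [zip_reverse_eq d.toList (lsAux 'L' 0 d.toList) (by rw [lsAux_length]),
      List.foldl_reverse]
  rw [foldRS_rev]
  simp

-- the left sweep over a dot segment
lemma lsAux_dots : ∀ (m : Nat) (j : Int) (a : Char) (t : List Char),
    lsAux a j (List.replicate m '.' ++ t)
      = (List.range m).map (fun (k : Nat) => (a, j + (k : Int) + 1)) ++ lsAux a (j + m) t := by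
  intro m
  induction m with
  | zero => intro j a t; simp
  | succ m ih =>
    intro j a t
    rw [List.replicate_succ, List.cons_append]
    simp only [lsAux]
    rw [ih (j + 1) a t]
    rw [List.range_succ_eq_map, List.map_cons, List.map_map]
    have hmap : (List.range m).map ((fun (k : Nat) => (a, j + (k : Int) + 1)) ∘ Nat.succ)
        = (List.range m).map (fun (k : Nat) => (a, j + 1 + (k : Int) + 1)) := by
      apply List.map_congr_left
      intro k hk
      simp only [Function.comp_apply, Prod.mk.injEq, true_and]
      push_cast
      ring
    rw [hmap]
    have harg : j + ((m : Nat) + 1 : Nat) = j + 1 + (m : Int) := by push_cast; ring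
    rw [harg]
    norm_num

-- rsAux distributes over append
lemma rsAux_append : ∀ (xs ys : List (Char × (Char × Int))) (v : Char) (rd : Int),
    rsAux (xs ++ ys) v rd
      = ((rsAux xs (rsAux ys v rd).2.1 (rsAux ys v rd).2.2).1 ++ (rsAux ys v rd).1,
         (rsAux xs (rsAux ys v rd).2.1 (rsAux ys v rd).2.2).2) := by
  intro xs
  induction xs with
  | nil => intro ys v rd; simp [rsAux]
  | cons p t ih =>
    intro ys v rd
    simp only [List.cons_append, rsAux, ih]

-- the right-to-left pass over a dot segment entered with context (v, 0)
lemma rs_dots (a v : Char) : ∀ (m : Nat) (j : Int),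
    rsAux ((List.range m).map (fun (k : Nat) => ('.', (a, j + (k : Int) + 1)))) v 0
      = ((List.range m).map (fun (k : Nat) => cellOut a v (j + (k : Int) + 1) ((m : Int) - (k : Int)) '.'),
         v, (m : Int)) := by
  intro m
  induction m with
  | zero => intro j; simp [rsAux]
  | succ m ih =>
    intro j
    simp only [List.range_succ_eq_map, List.map_cons, List.map_map, Nat.cast_zero]
    have hmap1 : (List.range m).map ((fun (k : Nat) => (('.', (a, j + (k : Int) + 1)) : Char × Char × Int)) ∘ Nat.succ)
        = (List.range m).map (fun (k : Nat) => (('.', (a, (j + 1) + (k : Int) + 1)) : Char × Char × Int)) := by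
      apply List.map_congr_left
      intro k hk
      simp only [Function.comp_apply, Prod.mk.injEq, true_and]
      push_cast
      ring
    rw [hmap1]
    simp only [rsAux]
    rw [ih (j + 1)]
    simp only [reduceIte, Prod.mk.injEq, List.cons.injEq]
    refine ⟨⟨?_, ?_⟩, trivial, by push_cast; ring⟩
    · rw [show ((m + 1 : Nat) : Int) - 0 = (m : Int) + 1 from by push_cast; ring]
    · apply List.map_congr_left
      intro k hk
      simp only [Function.comp_apply]
      have h1 : j + 1 + (k : Int) + 1 = j + ((Nat.succ k : Nat) : Int) + 1 := by push_cast; ring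
      have h2 : (m : Int) - (k : Int) = ((m + 1 : Nat) : Int) - ((Nat.succ k : Nat) : Int) := by push_cast; ring
      rw [h1, h2]

-- the per-cell decisions across one gap of m dots form fillGap
lemma fillGap_length (a v : Char) (m : Nat) : (fillGap a v m).length = m := by
  unfold fillGap
  split_ifs <;> simp <;> omega

lemma cells_eq_fillGap (a v : Char) (m : Nat) :
    (List.range m).map (fun (k : Nat) => cellOut a v ((0 : Int) + (k : Int) + 1) ((m : Int) - (k : Int)) '.')
      = fillGap a v m := by
  apply List.ext_getElem
  · simp [fillGap_length]
  · intro i h1 h2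
    simp only [List.length_map, List.length_range] at h1
    simp only [List.getElem_map, List.getElem_range]
    unfold cellOut
    dsimp only
    rw [if_neg (by omega)]
    have hm : (0 : Int) + (i : Int) + 1 + ((m : Int) - (i : Int)) - 1 = (m : Int) := by ring
    rw [hm, PySem.Int.floordiv_eq_ediv_of_pos (by omega)]
    unfold fillGap
    by_cases h1v : a = v
    · simp only [if_pos h1v, List.getElem_replicate]
    · by_cases h2v : a = 'L' ∧ v = 'R'
      · simp only [if_neg h1v, if_pos h2v, List.getElem_replicate]
      · simp only [if_neg h1v, if_neg h2v, List.getElem_append, List.getElem_replicate,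
          List.length_replicate, List.length_append]
        split_ifs <;> first | rfl | (exfalso; omega) | omega

-- the two sweeps combine to goSpec
lemma replicate_dots_eq_map (m : Nat) :
    List.replicate m '.' = (List.range m).map (fun (_ : Nat) => '.') := by
  simp [List.map_const']

lemma mainB : ∀ (t : List Char) (m : Nat) (a : Char),
    (rsAux ((List.replicate m '.' ++ t).zip (lsAux a 0 (List.replicate m '.' ++ t))) 'R' 0).1
      = goSpec a m t := by
  intro t
  induction t with
  | nil =>
    intro m a
    rw [lsAux_dots]
    simp only [lsAux, List.append_nil]
    rw [replicate_dots_eq_map, List.zip_map', rs_dots a 'R' m 0]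
    simp only [goSpec]
    exact cells_eq_fillGap a 'R' m
  | cons c t' ih =>
    intro m a
    by_cases hc : c = '.'
    · subst hc
      rw [show List.replicate m '.' ++ '.' :: t' = List.replicate (m + 1) '.' ++ t' from by
        rw [List.replicate_succ']; simp]
      rw [ih (m + 1) a]
      simp [goSpec]
    · rw [lsAux_dots]
      rw [show lsAux a ((0 : Int) + m) (c :: t') = (c, 0) :: lsAux c 0 t' from by
        simp [lsAux, hc]]
      rw [replicate_dots_eq_map, List.zip_append (by simp), List.zip_cons_cons, List.zip_map']
      rw [rsAux_append]
      have hys : rsAux ((c, (c, 0)) :: t'.zip (lsAux c 0 t')) 'R' 0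
          = (c :: (rsAux (t'.zip (lsAux c 0 t')) 'R' 0).1, c, 0) := by
        simp only [rsAux]
        simp [cellOut, hc]
      rw [hys]
      rw [rs_dots a c m 0]
      have ht := ih 0 c
      simp only [List.replicate_zero, List.nil_append] at ht
      rw [ht, cells_eq_fillGap a c m]
      simp [goSpec, hc]

lemma B_eq_goSpec (d : String) :
    pushDominoes2_alt d = String.ofList (goSpec 'L' 0 d.toList) := by
  rw [portB_eq]
  have hm := mainB d.toList 0 'L'
  simp only [List.replicate_zero, List.nil_append] at hm
  rw [hm]

-- ===== VERDICT (by name: the statement is the Claim_ definition above) =====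
theorem pushDominoes2_spec : Claim_equal_pushDominoes2 := by
  intro d _
  unfold Spec_pushDominoes2
  rw [A_eq_goSpec d, B_eq_goSpec d]
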